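-- pv_equiv track=rewrite | github.com/finalFlash159/SmartCustoms-Assistant | app/pipelines/doc_pipelines/doc_processor.py | get_num_splits
-- ===== SOURCE A (Python) =====
-- import math
--
-- def get_num_splits(token_count):
--     RANGES = [
--         (750, 1), (1500, 2), (2250, 3), (3000, 4), (3750, 5),
--         (4500, 6), (5250, 7), (6000, 8), (6750, 9), (7500, 10),
--         (8250, 11), (9000, 12), (9750, 13), (10500, 14), (11250, 15),
--         (12000, 16), (12750, 17), (13500, 18), (14250, 19), (15000, 20),
--     ]
--     if token_count > 15000:
--         return math.ceil(token_count / 1000)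
--     for upper_bound, splits in RANGES:
--         if token_count <= upper_bound:
--             return splits
--     return 1
-- ===== SOURCE B (Python) =====
-- import math
--
-- def get_num_splits(token_count):
--     if token_count > 15000:
--         return math.ceil(token_count / 1000)
--     return max(1, math.ceil(token_count / 750))
-- ===== Notes on version B (the rewrite author's own statement) =====
-- stated objective: simpler
-- what changed: Replaces the 20-entry RANGES table and its linear scan with the closed form max(1, ceil(token_count/750)) for token_count <= 15000, keeping the ceil(token_count/1000) branch for larger counts.
import Mathlib
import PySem

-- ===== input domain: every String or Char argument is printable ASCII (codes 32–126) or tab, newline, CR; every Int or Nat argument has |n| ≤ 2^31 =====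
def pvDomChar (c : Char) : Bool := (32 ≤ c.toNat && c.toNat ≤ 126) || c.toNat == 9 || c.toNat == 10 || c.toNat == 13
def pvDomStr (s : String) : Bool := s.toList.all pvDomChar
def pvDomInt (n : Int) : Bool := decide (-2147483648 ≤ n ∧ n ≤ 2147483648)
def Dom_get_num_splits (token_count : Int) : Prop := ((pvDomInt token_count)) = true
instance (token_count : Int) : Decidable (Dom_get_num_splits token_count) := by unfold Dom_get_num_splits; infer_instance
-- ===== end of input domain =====

-- B replaces A's 20-entry lookup table and linear scan by a closed arithmetic form (simpler, no table).
-- math.ceil(n / d) on an int n with |n| ≤ 2^31 and d ∈ {750, 1000} is exact under float division,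
-- so both ports model it as integer ceiling division -((-n) fdiv d).

-- ===== PORT A =====
-- first (upper_bound, splits) pair of the table with token_count ≤ upper_bound; 1 if none
def getNumSplitsScan (tc : Int) : List (Int × Int) → Int
  | [] => 1
  | (ub, s) :: rest => if tc ≤ ub then s else getNumSplitsScan tc rest

def get_num_splits (token_count : Int) : Int :=
  let RANGES : List (Int × Int) :=
    [(750, 1), (1500, 2), (2250, 3), (3000, 4), (3750, 5),
     (4500, 6), (5250, 7), (6000, 8), (6750, 9), (7500, 10),
     (8250, 11), (9000, 12), (9750, 13), (10500, 14), (11250, 15),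
     (12000, 16), (12750, 17), (13500, 18), (14250, 19), (15000, 20)]
  if token_count > 15000 then -(Int.fdiv (-token_count) 1000)   -- math.ceil(token_count / 1000)
  else getNumSplitsScan token_count RANGES

-- ===== PORT B =====
def pyCeilDiv (n d : Int) : Int := -(Int.fdiv (-n) d)           -- math.ceil(n / d), exact on Dom

def get_num_splits_alt (token_count : Int) : Int :=
  if token_count > 15000 then pyCeilDiv token_count 1000
  else max 1 (pyCeilDiv token_count 750)

-- ===== PRECONDITION & SPEC =====
def Spec_get_num_splits (token_count : Int) (out : Int) : Prop := out = get_num_splits_alt token_count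
instance (token_count : Int) (out : Int) : Decidable (Spec_get_num_splits token_count out) := by unfold Spec_get_num_splits; infer_instance

-- ===== CLAIM (what is proved, stated in full; the proofs are below) =====
def Claim_equal_get_num_splits : Prop := ∀ (token_count : Int), Dom_get_num_splits token_count → Spec_get_num_splits token_count (get_num_splits token_count)

-- ===== LEMMAS AND PROOFS =====

-- ===== VERDICT (by name: the statement is the Claim_ definition above) =====
set_option maxHeartbeats 1000000 in
theorem get_num_splits_spec : Claim_equal_get_num_splits := by
  intro tc _
  unfold Spec_get_num_splits get_num_splits get_num_splits_alt pyCeilDiv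
  by_cases h : tc > 15000
  · simp only [if_pos h]
  · rw [if_neg h, if_neg h, Int.fdiv_eq_ediv]
    simp only [getNumSplitsScan]
    by_cases h1 : tc ≤ 750
    · rw [if_pos h1]; split_ifs <;> omega
    rw [if_neg h1]
    by_cases h2 : tc ≤ 1500
    · rw [if_pos h2]; split_ifs <;> omega
    rw [if_neg h2]
    by_cases h3 : tc ≤ 2250
    · rw [if_pos h3]; split_ifs <;> omega
    rw [if_neg h3]
    by_cases h4 : tc ≤ 3000
    · rw [if_pos h4]; split_ifs <;> omega
    rw [if_neg h4]
    by_cases h5 : tc ≤ 3750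
    · rw [if_pos h5]; split_ifs <;> omega
    rw [if_neg h5]
    by_cases h6 : tc ≤ 4500
    · rw [if_pos h6]; split_ifs <;> omega
    rw [if_neg h6]
    by_cases h7 : tc ≤ 5250
    · rw [if_pos h7]; split_ifs <;> omega
    rw [if_neg h7]
    by_cases h8 : tc ≤ 6000
    · rw [if_pos h8]; split_ifs <;> omega
    rw [if_neg h8]
    by_cases h9 : tc ≤ 6750
    · rw [if_pos h9]; split_ifs <;> omega
    rw [if_neg h9]
    by_cases h10 : tc ≤ 7500
    · rw [if_pos h10]; split_ifs <;> omega
    rw [if_neg h10]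
    by_cases h11 : tc ≤ 8250
    · rw [if_pos h11]; split_ifs <;> omega
    rw [if_neg h11]
    by_cases h12 : tc ≤ 9000
    · rw [if_pos h12]; split_ifs <;> omega
    rw [if_neg h12]
    by_cases h13 : tc ≤ 9750
    · rw [if_pos h13]; split_ifs <;> omega
    rw [if_neg h13]
    by_cases h14 : tc ≤ 10500
    · rw [if_pos h14]; split_ifs <;> omega
    rw [if_neg h14]
    by_cases h15 : tc ≤ 11250
    · rw [if_pos h15]; split_ifs <;> omega
    rw [if_neg h15]
    by_cases h16 : tc ≤ 12000
    · rw [if_pos h16]; split_ifs <;> omega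
    rw [if_neg h16]
    by_cases h17 : tc ≤ 12750
    · rw [if_pos h17]; split_ifs <;> omega
    rw [if_neg h17]
    by_cases h18 : tc ≤ 13500
    · rw [if_pos h18]; split_ifs <;> omega
    rw [if_neg h18]
    by_cases h19 : tc ≤ 14250
    · rw [if_pos h19]; split_ifs <;> omega
    rw [if_neg h19]
    by_cases h20 : tc ≤ 15000
    · rw [if_pos h20]; split_ifs <;> omega
    rw [if_neg h20]
    omega
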